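-- pv_equiv track=rewrite | github.com/SimSimEEE/crafton_jungle_algorithm | 프로그래머스/3/152995. 인사고과/인사고과.py | solution
-- ===== SOURCE A (Python) =====
-- def solution(scores):
--     wanho_work_attitude, wanho_peer_review = scores[0]
--     other_scores = scores[1:]
--     max_peer_review = 0
--     rank = 1
--
--     sorted_other_scores = sorted(other_scores, key=lambda s: (-s[0], s[1]))
--
--     for other_work_attitude, other_peer_review in sorted_other_scores:
--         if wanho_work_attitude < other_work_attitude and wanho_peer_review < other_peer_review:
--             return -1
--
--         if max_peer_review <= other_peer_review:
--             max_peer_review = other_peer_review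
--
--             if wanho_work_attitude + wanho_peer_review < other_work_attitude + other_peer_review:
--                 rank += 1
--
--     return rank
-- ===== SOURCE B (Python) =====
-- def solution(scores):
--     wanho_attitude, wanho_peer = scores[0]
--     others = scores[1:]
--     if any(a > wanho_attitude and p > wanho_peer for a, p in others):
--         return -1
--     rank = 1
--     for a, p in others:
--         dominated = any(x > a and y > p for x, y in others)
--         if not dominated and a + p > wanho_attitude + wanho_peer:
--             rank += 1
--     return rank
-- ===== Notes on version B (the rewrite author's own statement) =====
-- stated objective: simpler
-- what changed: Replaced the sort-by-(-attitude,peer)-then-incremental-max scan with a direct brute-force pass: return -1 if any peer strictly dominates wanho, then count the others that are strictly dominated by nobody and whose total strictly exceeds wanho's.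
-- intended difference: On inputs where nobody dominates wanho but some undominated employee with a NEGATIVE peer score has a total above wanho's, A skips that employee (its max_peer starts at 0, an artefact of the init value) and returns a too-small rank, while B counts every undominated higher-total employee, which is the intended ranking. — e.g. on solution([(0, 0), (5, -1)]): A returns 1, B returns 2
import Mathlib
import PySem

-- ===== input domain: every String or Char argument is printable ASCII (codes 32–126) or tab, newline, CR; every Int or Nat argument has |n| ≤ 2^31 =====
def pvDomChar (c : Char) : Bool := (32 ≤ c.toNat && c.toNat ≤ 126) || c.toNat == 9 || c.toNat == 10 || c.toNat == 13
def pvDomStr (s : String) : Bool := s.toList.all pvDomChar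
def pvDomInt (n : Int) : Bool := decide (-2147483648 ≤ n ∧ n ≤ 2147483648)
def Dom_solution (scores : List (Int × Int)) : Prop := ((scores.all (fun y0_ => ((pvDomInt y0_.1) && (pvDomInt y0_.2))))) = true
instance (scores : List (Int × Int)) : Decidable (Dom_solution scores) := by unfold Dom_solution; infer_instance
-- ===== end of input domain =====

-- B drops A's sort-plus-running-max scan for a direct brute-force rank count (simpler, same task);
-- A's max_peer=0 init silently skips undominated employees with negative peer scores — stated as D_ below.


-- ===== PORT A =====
-- the for-loop over the sorted list, carrying (max_peer, rank); returns -1 on a dominator of wanho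
def solutionLoop (wa wp : Int) (maxp rank : Int) : List (Int × Int) → Int
  | [] => rank
  | (a, p) :: rest =>
    if wa < a ∧ wp < p then -1
    else if maxp ≤ p then
      if wa + wp < a + p then solutionLoop wa wp p (rank + 1) rest
      else solutionLoop wa wp p rank rest
    else solutionLoop wa wp maxp rank rest

def solution (scores : List (Int × Int)) : Int :=
  match scores with
  | [] => 0  -- scores[0] raises IndexError in Python; excluded by Pre_solution
  | (wa, wp) :: others =>
      solutionLoop wa wp 0 1 (PySem.List.sorted2 others (fun s => -s.1) (fun s => s.2))

-- ===== PORT B =====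
def solution_alt (scores : List (Int × Int)) : Int :=
  match scores with
  | [] => 0  -- scores[0] raises IndexError in Python; excluded by Pre_solution
  | (wa, wp) :: others =>
    if others.any (fun o => decide (wa < o.1) && decide (wp < o.2)) then -1
    else others.foldl (fun rank o =>
      if (!(others.any fun y => decide (o.1 < y.1) && decide (o.2 < y.2))
          && decide (wa + wp < o.1 + o.2)) = true
      then rank + 1 else rank) 1

-- ===== PRECONDITION & SPEC =====
-- Pre_ excludes only the empty list, on which both Pythons raise IndexError at scores[0].
def Pre_solution (scores : List (Int × Int)) : Prop := scores ≠ []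
instance (scores : List (Int × Int)) : Decidable (Pre_solution scores) := by unfold Pre_solution; infer_instance
def pvWitness_solution : (List (Int × Int)) := [(3, 4), (5, 1), (2, 6)]

-- On inputs where nobody strictly dominates wanho but some employee, dominated by nobody, has a
-- NEGATIVE peer score and a total above wanho's, A skips that employee (its max_peer starts at 0,
-- an artefact of the init value) and returns a too-small rank; B counts every undominated
-- higher-total employee, which is the intended ranking.
def D_solution (scores : List (Int × Int)) : Prop :=
  scores ≠ [] ∧
  (∀ y ∈ scores.tail, ¬(scores.headI.1 < y.1 ∧ scores.headI.2 < y.2)) ∧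
  ∃ x ∈ scores.tail, x.2 < 0 ∧ scores.headI.1 + scores.headI.2 < x.1 + x.2 ∧
    ∀ y ∈ scores.tail, ¬(x.1 < y.1 ∧ x.2 < y.2)
instance (scores : List (Int × Int)) : Decidable (D_solution scores) := by unfold D_solution; infer_instance

def Spec_solution (scores : List (Int × Int)) (out : Int) : Prop := ¬ D_solution scores → out = solution_alt scores
instance (scores : List (Int × Int)) (out : Int) : Decidable (Spec_solution scores out) := by unfold Spec_solution; infer_instance

def pvDiffWitness_solution : (List (Int × Int)) := [(0, 0), (5, -1)]
def pvDiffWitnessOut_solution : Int × Int := (1, 2)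

-- ===== CLAIM (what is proved, stated in full; the proofs are below) =====
def Claim_unchanged_solution : Prop := ∀ (scores : List (Int × Int)), Dom_solution scores → Pre_solution scores → Spec_solution scores (solution scores)
def Claim_changed_solution : Prop := Dom_solution (pvDiffWitness_solution) ∧ Pre_solution (pvDiffWitness_solution) ∧ D_solution (pvDiffWitness_solution) ∧ solution (pvDiffWitness_solution) = pvDiffWitnessOut_solution.1 ∧ solution_alt (pvDiffWitness_solution) = pvDiffWitnessOut_solution.2 ∧ pvDiffWitnessOut_solution.1 ≠ pvDiffWitnessOut_solution.2
def Claim_exact_solution : Prop := ∀ (scores : List (Int × Int)), Dom_solution scores → Pre_solution scores → D_solution scores → solution scores ≠ solution_alt scores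

-- ===== LEMMAS AND PROOFS =====

-- the comparison sorted2 sorts by: "a strictly before b" for key (-att, peer)
def ltB (a b : Int × Int) : Bool :=
  decide (-a.1 < -b.1) || !decide (-b.1 < -a.1) && decide (a.2 < b.2)

-- "a may come before b" (the non-strict lexicographic order the sorted list is Pairwise in)
def leR (a b : Int × Int) : Prop := ltB b a = false

lemma ltB_true_iff (a b : Int × Int) : ltB a b = true ↔ (b.1 < a.1 ∨ (b.1 ≤ a.1 ∧ a.2 < b.2)) := by
  simp only [ltB, Bool.or_eq_true, Bool.and_eq_true, Bool.not_eq_true', decide_eq_true_eq,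
    decide_eq_false_iff_not]
  omega

lemma ltB_false_iff (a b : Int × Int) : ltB a b = false ↔ (a.1 < b.1 ∨ (a.1 ≤ b.1 ∧ b.2 ≤ a.2)) := by
  rw [← Bool.not_eq_true, ltB_true_iff]
  omega

lemma leR_iff (a b : Int × Int) : leR a b ↔ (b.1 < a.1 ∨ (b.1 ≤ a.1 ∧ a.2 ≤ b.2)) := by
  unfold leR
  rw [ltB_false_iff]

lemma insertBy_pairwise (x : Int × Int) (ys : List (Int × Int))
    (h : ys.Pairwise leR) : (PySem.List.insertBy ltB x ys).Pairwise leR := by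
  induction ys with
  | nil => simp [PySem.List.insertBy]
  | cons y ys ih =>
    rcases List.pairwise_cons.mp h with ⟨hy, hys⟩
    by_cases hb : ltB x y = true
    · have : PySem.List.insertBy ltB x (y :: ys) = x :: y :: ys := by
        simp [PySem.List.insertBy, hb]
      rw [this]
      refine List.pairwise_cons.mpr ⟨?_, h⟩
      intro z hz
      rcases List.mem_cons.mp hz with rfl | hz
      · rw [ltB_true_iff] at hb
        rw [leR_iff]; omega
      · have hyz := (leR_iff _ _).mp (hy z hz)
        rw [ltB_true_iff] at hb
        rw [leR_iff]; omega
    · have : PySem.List.insertBy ltB x (y :: ys) = y :: PySem.List.insertBy ltB x ys := by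
        simp [PySem.List.insertBy, hb]
      rw [this]
      refine List.pairwise_cons.mpr ⟨?_, ih hys⟩
      intro z hz
      rcases (PySem.List.mem_insertBy ltB x z ys).mp hz with rfl | hz
      · exact eq_false_of_ne_true hb
      · exact hy z hz

lemma sorted2_pairwise (others : List (Int × Int)) :
    (PySem.List.sorted2 others (fun s => -s.1) (fun s => s.2)).Pairwise leR := by
  show (List.foldl (fun acc x => PySem.List.insertBy ltB x acc) [] others).Pairwise leR
  have : ∀ (l : List (Int × Int)) (acc : List (Int × Int)), acc.Pairwise leR →
      (List.foldl (fun acc x => PySem.List.insertBy ltB x acc) acc l).Pairwise leR := by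
    intro l
    induction l with
    | nil => intro acc h; exact h
    | cons x l ih => intro acc h; exact ih _ (insertBy_pairwise x acc h)
  exact this others [] (List.Pairwise.nil)

-- the predicate A's loop counts, for a given running max: peer at least maxp, not dominated in t, total above wanho's
def cntPred (wa wp maxp : Int) (t : List (Int × Int)) (x : Int × Int) : Bool :=
  decide (maxp ≤ x.2) && !(t.any fun y => decide (x.1 < y.1) && decide (x.2 < y.2))
    && decide (wa + wp < x.1 + x.2)

lemma solutionLoop_neg1 (wa wp : Int) : ∀ (t : List (Int × Int)) (maxp rank : Int),
    (∃ x ∈ t, wa < x.1 ∧ wp < x.2) → solutionLoop wa wp maxp rank t = -1 := by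
  intro t
  induction t with
  | nil => intro _ _ h; simp at h
  | cons hd r ih =>
    intro maxp rank h
    obtain ⟨a, p⟩ := hd
    rcases h with ⟨x, hx, hdomx⟩
    rcases List.mem_cons.mp hx with rfl | hx
    · simp [solutionLoop, hdomx]
    · by_cases hhd : wa < a ∧ wp < p
      · simp [solutionLoop, hhd]
      · simp only [solutionLoop, if_neg hhd]
        split_ifs <;> exact ih _ _ ⟨x, hx, hdomx⟩

lemma solutionLoop_count (wa wp : Int) : ∀ (t : List (Int × Int)) (maxp rank : Int),
    t.Pairwise leR → (∀ x ∈ t, ¬(wa < x.1 ∧ wp < x.2)) →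
    solutionLoop wa wp maxp rank t = rank + (t.countP (cntPred wa wp maxp t) : Int) := by
  intro t
  induction t with
  | nil => intro maxp rank _ _; simp [solutionLoop]
  | cons hd r ih =>
    intro maxp rank hpw hnd
    obtain ⟨a, p⟩ := hd
    rcases List.pairwise_cons.mp hpw with ⟨hhd, hr⟩
    have hndh : ¬(wa < a ∧ wp < p) := hnd _ (List.mem_cons_self)
    have hndr : ∀ x ∈ r, ¬(wa < x.1 ∧ wp < x.2) := fun x hx => hnd x (List.mem_cons_of_mem _ hx)
    -- head is never dominated inside (a,p) :: r
    have hanyhd : ((a, p) :: r).any (fun y => decide ((a,p).1 < y.1) && decide ((a,p).2 < y.2)) = false := by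
      rw [List.any_eq_false]
      intro y hy
      rcases List.mem_cons.mp hy with rfl | hy
      · simp
      · have hRy := (leR_iff _ _).mp (hhd y hy)
        simp only at hRy
        simp only [Bool.and_eq_true, decide_eq_true_eq]
        omega
    -- tail predicate rewrite: the running-max update absorbs domination by the head
    have hcongr : ∀ (m' : Int), ((maxp ≤ p ∧ m' = p) ∨ (p < maxp ∧ m' = maxp)) → ∀ x ∈ r,
        cntPred wa wp maxp ((a, p) :: r) x = cntPred wa wp m' r x := by
      intro m' hm' x hx
      have hRx := (leR_iff _ _).mp (hhd x hx)
      simp only at hRx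
      by_cases hq : (r.any fun y => decide (x.1 < y.1) && decide (x.2 < y.2)) = true
      · simp [cntPred, hq]
      · rw [Bool.not_eq_true] at hq
        apply Bool.eq_iff_iff.mpr
        simp only [cntPred, List.any_cons, hq, Bool.or_false, Bool.and_eq_true,
          Bool.not_eq_true', Bool.and_eq_false_iff, decide_eq_true_eq, decide_eq_false_iff_not,
          and_true]
        omega
    -- count of the head element
    have hheadP : cntPred wa wp maxp ((a, p) :: r) (a, p)
        = (decide (maxp ≤ p) && decide (wa + wp < a + p)) := by
      simp only [cntPred, hanyhd]
      simp
    have hcount : ∀ (m' : Int), ((maxp ≤ p ∧ m' = p) ∨ (p < maxp ∧ m' = maxp)) →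
        (((a, p) :: r).countP (cntPred wa wp maxp ((a, p) :: r)) : Int)
          = (r.countP (cntPred wa wp m' r) : Int)
            + (if maxp ≤ p ∧ wa + wp < a + p then 1 else 0) := by
      intro m' hm'
      rw [List.countP_cons, List.countP_congr (fun x hx => by
        rw [hcongr m' hm' x hx] : ∀ x ∈ r, _), hheadP]
      by_cases h1 : maxp ≤ p <;> by_cases h2 : wa + wp < a + p <;>
        simp [h1, h2]
    by_cases h1 : maxp ≤ p
    · by_cases h2 : wa + wp < a + p
      · simp only [solutionLoop, if_neg hndh, if_pos h1, if_pos h2]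
        rw [ih p (rank + 1) hr hndr, hcount p (Or.inl ⟨h1, rfl⟩)]
        simp [h1, h2]; ring
      · simp only [solutionLoop, if_neg hndh, if_pos h1, if_neg h2]
        rw [ih p rank hr hndr, hcount p (Or.inl ⟨h1, rfl⟩)]
        simp [h1, h2]
    · simp only [solutionLoop, if_neg hndh, if_neg h1]
      rw [ih maxp rank hr hndr, hcount maxp (Or.inr ⟨by omega, rfl⟩)]
      simp [h1]

-- B's predicate (what its loop counts)
def predB (wa wp : Int) (others : List (Int × Int)) (o : Int × Int) : Bool :=
  !(others.any fun y => decide (o.1 < y.1) && decide (o.2 < y.2)) && decide (wa + wp < o.1 + o.2)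

lemma alt_eq_count (wa wp : Int) (others : List (Int × Int))
    (hnd : ∀ x ∈ others, ¬(wa < x.1 ∧ wp < x.2)) :
    solution_alt ((wa, wp) :: others) = 1 + (others.countP (predB wa wp others) : Int) := by
  have hany : others.any (fun o => decide (wa < o.1) && decide (wp < o.2)) = false := by
    rw [List.any_eq_false]
    intro y hy
    have := hnd y hy
    simp at this ⊢; omega
  simp only [solution_alt, hany, Bool.false_eq_true, if_false]
  have : ∀ (l : List (Int × Int)) (hl : ∀ x ∈ l, x ∈ others) (init : Int),
      l.foldl (fun rank o =>
        if (!(others.any fun y => decide (o.1 < y.1) && decide (o.2 < y.2))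
            && decide (wa + wp < o.1 + o.2)) = true
        then rank + 1 else rank) init = init + (l.countP (predB wa wp others) : Int) := by
    intro l
    induction l with
    | nil => intro _ _; simp
    | cons x l ih =>
      intro hl init
      simp only [List.foldl_cons, List.countP_cons]
      rw [ih (fun y hy => hl y (List.mem_cons_of_mem _ hy))]
      by_cases hx : predB wa wp others x = true
      · simp only [predB] at hx
        rw [if_pos hx]
        simp [predB, hx]; ring
      · simp only [predB] at hx
        rw [if_neg hx]
        simp [predB, hx]
  rw [this others (fun _ h => h) 1]

-- A's value when nobody dominates wanho
lemma sol_eq_count (wa wp : Int) (others : List (Int × Int))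
    (hnd : ∀ x ∈ others, ¬(wa < x.1 ∧ wp < x.2)) :
    solution ((wa, wp) :: others)
      = 1 + (others.countP (fun x => decide (0 ≤ x.2) && predB wa wp others x) : Int) := by
  have hperm : (PySem.List.sorted2 others (fun s => -s.1) (fun s => s.2)).Perm others :=
    PySem.List.sorted2_perm others _ _ false
  have hmem : ∀ x, x ∈ (PySem.List.sorted2 others (fun s => -s.1) (fun s => s.2)) ↔ x ∈ others :=
    fun x => hperm.mem_iff
  simp only [solution]
  rw [solutionLoop_count wa wp _ 0 1 (sorted2_pairwise others)
      (fun x hx => hnd x ((hmem x).mp hx))]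
  congr 1
  have hpred : ∀ x ∈ (PySem.List.sorted2 others (fun s => -s.1) (fun s => s.2)),
      cntPred wa wp 0 (PySem.List.sorted2 others (fun s => -s.1) (fun s => s.2)) x
        = (decide (0 ≤ x.2) && predB wa wp others x) := by
    intro x _
    have hanyeq : ((PySem.List.sorted2 others (fun s => -s.1) (fun s => s.2)).any
        fun y => decide (x.1 < y.1) && decide (x.2 < y.2))
        = (others.any fun y => decide (x.1 < y.1) && decide (x.2 < y.2)) :=
      hperm.any_eq
    simp only [cntPred, predB, hanyeq, Bool.and_assoc]
  rw [List.countP_congr (fun x hx => by rw [hpred x hx] : ∀ x ∈ _, _)]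
  exact_mod_cast hperm.countP_eq _

lemma countP_lt_of_witness {α : Type} (p q : α → Bool) (l : List α)
    (hpq : ∀ x ∈ l, p x = true → q x = true)
    (x : α) (hx : x ∈ l) (hqx : q x = true) (hpx : p x = false) :
    l.countP p < l.countP q := by
  induction l with
  | nil => simp at hx
  | cons y l ih =>
    rcases List.mem_cons.mp hx with rfl | hx
    · simp only [List.countP_cons, hqx, hpx]
      have : l.countP p ≤ l.countP q :=
        List.countP_mono_left (fun z hz => hpq z (List.mem_cons_of_mem _ hz))
      simp; omega
    · have h1 := ih (fun z hz => hpq z (List.mem_cons_of_mem _ hz)) hx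
      simp only [List.countP_cons]
      by_cases hy : p y = true
      · rw [hy, hpq y List.mem_cons_self hy]; omega
      · rw [Bool.not_eq_true] at hy
        simp [hy]
        split_ifs <;> omega

-- main case analysis shared by the two theorems
lemma main_cases (wa wp : Int) (others : List (Int × Int)) :
    (∃ x ∈ others, wa < x.1 ∧ wp < x.2) →
      solution ((wa, wp) :: others) = -1 ∧ solution_alt ((wa, wp) :: others) = -1 := by
  intro hdom
  constructor
  · have hperm : (PySem.List.sorted2 others (fun s => -s.1) (fun s => s.2)).Perm others :=
      PySem.List.sorted2_perm others _ _ false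
    rcases hdom with ⟨x, hx, hd⟩
    simp only [solution]
    exact solutionLoop_neg1 wa wp _ 0 1 ⟨x, hperm.mem_iff.mpr hx, hd⟩
  · rcases hdom with ⟨x, hx, hd⟩
    have : others.any (fun o => decide (wa < o.1) && decide (wp < o.2)) = true := by
      rw [List.any_eq_true]
      exact ⟨x, hx, by simp [hd.1, hd.2]⟩
    simp [solution_alt, this]

-- ===== VERDICT (by name: the statement is the Claim_ definition above) =====
theorem solution_spec : Claim_unchanged_solution := by
  intro scores _ hpre hnD
  match scores with
  | [] => exact absurd rfl hpre
  | (wa, wp) :: others =>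
    by_cases hdom : ∃ x ∈ others, wa < x.1 ∧ wp < x.2
    · rcases main_cases wa wp others hdom with ⟨h1, h2⟩
      rw [h1, h2]
    · push_neg at hdom
      have hnd : ∀ x ∈ others, ¬(wa < x.1 ∧ wp < x.2) := by
        intro x hx ⟨h1, h2⟩; exact absurd h2 (by simpa using hdom x hx h1)
      rw [sol_eq_count wa wp others hnd, alt_eq_count wa wp others hnd]
      congr 2
      apply List.countP_congr
      intro x hx
      -- ¬D: no undominated, negative-peer, higher-total element exists
      unfold D_solution at hnD
      simp only [List.tail_cons, List.headI] at hnD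
      push_neg at hnD
      have hnD' := hnD (by simp) hdom
      by_cases hb : predB wa wp others x = true
      · 
        have hx2 : 0 ≤ x.2 := by
          by_contra hneg
          push_neg at hneg
          have hb' := hb
          simp only [predB, Bool.and_eq_true, Bool.not_eq_true'] at hb'
          rcases hb' with ⟨hnodom, htot⟩
          rcases hnD' x hx hneg (by simpa using htot) with ⟨y, hy, hd1, hd2⟩
          have hyt : (others.any fun y => decide (x.1 < y.1) && decide (x.2 < y.2)) = true :=
            List.any_eq_true.mpr ⟨y, hy, by simp [hd1, hd2]⟩
          rw [hyt] at hnodom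
          exact absurd hnodom (by simp)
        rw [hb]
        simp [hx2]
      · rw [eq_false_of_ne_true hb]
        simp

theorem solution_changed : Claim_changed_solution := by
  unfold Claim_changed_solution; decide

theorem solution_tight : Claim_exact_solution := by
  intro scores _ hpre hD
  unfold D_solution at hD
  match scores with
  | [] => exact absurd rfl hpre
  | (wa, wp) :: others =>
    simp only [List.tail_cons, List.headI] at hD
    rcases hD with ⟨_, hnodomw, x, hx, hxneg, hxtot, hxnodom⟩
    have hnd : ∀ z ∈ others, ¬(wa < z.1 ∧ wp < z.2) := hnodomw
    rw [sol_eq_count wa wp others hnd, alt_eq_count wa wp others hnd]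
    have hlt : others.countP (fun z => decide (0 ≤ z.2) && predB wa wp others z)
        < others.countP (predB wa wp others) := by
      apply countP_lt_of_witness _ _ _ (fun z _ hz => by
        simp only [Bool.and_eq_true] at hz; exact hz.2) x hx
      · simp only [predB, Bool.and_eq_true, Bool.not_eq_true', List.any_eq_false]
        refine ⟨?_, by simpa using hxtot⟩
        intro y hy
        have := hxnodom y hy
        simp at this ⊢; omega
      · simp only [Bool.and_eq_false_iff]
        left; simpa using (by omega : ¬ (0 ≤ x.2))
    intro heq
    have : (others.countP (fun z => decide (0 ≤ z.2) && predB wa wp others z) : Int)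
        = (others.countP (predB wa wp others) : Int) := by omega
    omega
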